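-- pv_equiv track=rewrite | github.com/chingistoktamyssov/CCC | '15/CCC '15 J3 - Rövarspråket.py | vowelfinder
-- ===== SOURCE A (Python) =====
-- numbers = {1: 'a', 2: 'b', 3: 'c', 4: 'd', 5: 'e', 6: 'f', 7: 'g', 8: 'h', 9: 'i', 10: 'j', 11: 'k', 12: 'l', 13: 'm', 14: 'n', 15: 'o', 16: 'p', 17: 'q', 18: 'r', 19: 's', 20: 't', 21: 'u', 22: 'v', 23: 'w', 24: 'x', 25: 'y', 26: 'z', 'a': 1, 'b': 2, 'c': 3, 'd': 4, 'e': 5, 'f': 6, 'g': 7, 'h': 8, 'i': 9, 'j': 10, 'k': 11, 'l': 12, 'm': 13, 'n': 14, 'o': 15, 'p': 16, 'q': 17, 'r': 18, 's': 19, 't': 20, 'u': 21, 'v': 22, 'w': 23, 'x': 24, 'y': 25, 'z': 26}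
--
-- vowels = ('a', 'e', 'i', 'o', 'u')
--
-- def vowelfinder(consonant):
--
--   vowelno = False
--   n1 = numbers[consonant]
--   n2 = numbers[consonant]
--
--   while numbers[n1] not in vowels:
--     n1 -= 1
--   while numbers[n2] not in vowels:
--     n2 += 1
--     try:
--       numbers[n2]
--     except:
--       vowelno = True
--       break
--
--   if vowelno == True:
--     return numbers[n1]
--
--   else:
--     diff1 = abs(numbers[consonant] - n1)
--     diff2 = abs(numbers[consonant] - n2)
--
--     if diff1 < diff2:
--       return numbers[n1]
--     elif diff2 < diff1:
--       return numbers[n2]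
--     else:
--       return numbers[n1]
-- ===== SOURCE B (Python) =====
-- numbers = {1: 'a', 2: 'b', 3: 'c', 4: 'd', 5: 'e', 6: 'f', 7: 'g', 8: 'h', 9: 'i', 10: 'j', 11: 'k', 12: 'l', 13: 'm', 14: 'n', 15: 'o', 16: 'p', 17: 'q', 18: 'r', 19: 's', 20: 't', 21: 'u', 22: 'v', 23: 'w', 24: 'x', 25: 'y', 26: 'z', 'a': 1, 'b': 2, 'c': 3, 'd': 4, 'e': 5, 'f': 6, 'g': 7, 'h': 8, 'i': 9, 'j': 10, 'k': 11, 'l': 12, 'm': 13, 'n': 14, 'o': 15, 'p': 16, 'q': 17, 'r': 18, 's': 19, 't': 20, 'u': 21, 'v': 22, 'w': 23, 'x': 24, 'y': 25, 'z': 26}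
--
-- vowels = ('a', 'e', 'i', 'o', 'u')
--
-- def vowelfinder(consonant):
--     # nearest vowel by alphabet distance; ties and the no-upper-vowel case
--     # resolve to the earlier vowel because we only replace on strictly smaller distance
--     n = ord(consonant) - 96
--     best = 'a'
--     for v in 'eiou':
--         if abs(ord(v) - 96 - n) < abs(ord(best) - 96 - n):
--             best = v
--     return best
-- ===== Notes on version B (the rewrite author's own statement) =====
-- stated objective: simpler
-- what changed: B replaces A's two while-loop scans over the mixed-key dict (down and up from the consonant, with a try/except for running off the alphabet) by one arithmetic pass over the five vowels using ord(), keeping the vowel of strictly smallest alphabet distance, which reproduces A's tie-break toward the earlier vowel and its no-upper-vowel case.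
import Mathlib
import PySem

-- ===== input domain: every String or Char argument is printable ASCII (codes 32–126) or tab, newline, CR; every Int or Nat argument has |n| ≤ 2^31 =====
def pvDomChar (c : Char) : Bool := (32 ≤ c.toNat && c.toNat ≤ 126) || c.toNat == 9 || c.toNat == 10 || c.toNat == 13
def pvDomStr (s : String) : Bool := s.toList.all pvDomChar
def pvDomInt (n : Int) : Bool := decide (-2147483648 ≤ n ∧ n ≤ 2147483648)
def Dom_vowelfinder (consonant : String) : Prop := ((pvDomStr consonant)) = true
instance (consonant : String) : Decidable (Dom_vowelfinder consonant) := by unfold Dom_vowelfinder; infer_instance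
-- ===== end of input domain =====

-- B replaces A's two dict-driven while-loop scans by one arithmetic pass over the five
-- vowels using character codes (simpler); return-value equivalence on lowercase letters.

-- ===== PORT A =====
-- the int→letter half of A's mixed-key dict 'numbers'
def numToLetter : List (Int × String) := [(1, "a"), (2, "b"), (3, "c"), (4, "d"), (5, "e"), (6, "f"), (7, "g"), (8, "h"), (9, "i"), (10, "j"), (11, "k"), (12, "l"), (13, "m"), (14, "n"), (15, "o"), (16, "p"), (17, "q"), (18, "r"), (19, "s"), (20, "t"), (21, "u"), (22, "v"), (23, "w"), (24, "x"), (25, "y"), (26, "z")]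
-- the letter→int half of 'numbers'
def letterToNum : List (String × Int) := [("a", 1), ("b", 2), ("c", 3), ("d", 4), ("e", 5), ("f", 6), ("g", 7), ("h", 8), ("i", 9), ("j", 10), ("k", 11), ("l", 12), ("m", 13), ("n", 14), ("o", 15), ("p", 16), ("q", 17), ("r", 18), ("s", 19), ("t", 20), ("u", 21), ("v", 22), ("w", 23), ("x", 24), ("y", 25), ("z", 26)]
def vowelsT : List String := ["a", "e", "i", "o", "u"]

-- 'while numbers[n1] not in vowels: n1 -= 1'; fuel 27 covers every key 1..26;
-- none = KeyError (outside Pre_)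
def loopDown (n1 : Int) : Nat → Option Int
  | 0 => none
  | fuel+1 =>
    match numToLetter.lookup n1 with
    | none => none
    | some s => if s ∈ vowelsT then some n1 else loopDown (n1 - 1) fuel

-- 'while numbers[n2] not in vowels: n2 += 1; try: numbers[n2] except: vowelno=True; break'
def loopUp (n2 : Int) : Nat → Option (Int × Bool)
  | 0 => none
  | fuel+1 =>
    match numToLetter.lookup n2 with
    | none => none
    | some s =>
      if s ∈ vowelsT then some (n2, false)
      else
        match numToLetter.lookup (n2 + 1) with
        | none => some (n2 + 1, true)
        | some _ => loopUp (n2 + 1) fuel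

def vowelfinder (consonant : String) : String :=
  match letterToNum.lookup consonant with
  | none => ""  -- KeyError, excluded by Pre_
  | some n =>
    match loopDown n 27, loopUp n 27 with
    | some n1, some (n2, vowelno) =>
      if vowelno = true then (numToLetter.lookup n1).getD ""
      else
        let diff1 := |n - n1|
        let diff2 := |n - n2|
        if diff1 < diff2 then (numToLetter.lookup n1).getD ""
        else if diff2 < diff1 then (numToLetter.lookup n2).getD ""
        else (numToLetter.lookup n1).getD ""
    | _, _ => ""  -- KeyError inside a loop, excluded by Pre_

-- ===== PORT B =====
-- Source B: n = ord(consonant) - 96; best = 'a'; for v in 'eiou': replace on strictly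
-- smaller |ord(v)-96-n|; return best.  Exact on single-character inputs (Pre_).
def vowelfinder_alt (consonant : String) : String :=
  let n : Int :=
    match consonant.toList with
    | [c] => (c.toNat : Int) - 96
    | _ => 0  -- ord() raises TypeError here: excluded by Pre_
  let best := ['e', 'i', 'o', 'u'].foldl
    (fun best v =>
      if |((v.toNat : Int) - 96) - n| < |((best.toNat : Int) - 96) - n| then v else best)
    'a'
  String.ofList [best]

-- ===== PRECONDITION & SPEC =====
-- Pre_ excludes exactly the inputs that are not a single lowercase letter a-z:
-- there A raises KeyError (numbers[consonant]).
def Pre_vowelfinder (consonant : String) : Prop :=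
  consonant ∈ ["a", "b", "c", "d", "e", "f", "g", "h", "i", "j", "k", "l", "m", "n", "o", "p", "q", "r", "s", "t", "u", "v", "w", "x", "y", "z"]
instance (consonant : String) : Decidable (Pre_vowelfinder consonant) := by
  unfold Pre_vowelfinder; infer_instance
def pvWitness_vowelfinder : String := "b"

def Spec_vowelfinder (consonant : String) (out : String) : Prop := out = vowelfinder_alt consonant
instance (consonant : String) (out : String) : Decidable (Spec_vowelfinder consonant out) := by unfold Spec_vowelfinder; infer_instance

-- ===== CLAIM (what is proved, stated in full; the proofs are below) =====
def Claim_equal_vowelfinder : Prop := ∀ (consonant : String), Dom_vowelfinder consonant → Pre_vowelfinder consonant → Spec_vowelfinder consonant (vowelfinder consonant)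

-- ===== LEMMAS AND PROOFS =====

-- ===== VERDICT (by name: the statement is the Claim_ definition above) =====
theorem vowelfinder_spec : Claim_equal_vowelfinder := by
  intro c _ hp
  unfold Pre_vowelfinder at hp
  fin_cases hp <;> decide
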